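-- pv_equiv track=rewrite | github.com/dprgarner/codejam | python/poetry.py | handle_case
-- ===== SOURCE A (Python) =====
-- import math
--
-- def handle_case(N):
--     if N < 10:
--         return N
--     digits = len(str(N))
--
--     # Steps to get to 10**digits
--     steps_to_get_to_digits = 0
--     for i in range(1, digits):
--         steps_to_get_to_digits += 10**math.floor(i / 2) + 10**math.ceil(i / 2) - 1
--
--     digits_str = str(N)
--     # Formula works for odd or even number, too.
--     first_half_reversed = int(''.join(list(reversed(digits_str[0:len(digits_str)//2])) ))
--     second_half = int(digits_str[digits//2:])
--     if first_half_reversed == 1: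
--         # Don't need to reverse at all.
--         return steps_to_get_to_digits + second_half
--     return  first_half_reversed + second_half + steps_to_get_to_digits
-- ===== SOURCE B (Python) =====
-- def powsum10(m):
--     # sum_{i=1}^{m} 10**(i//2), in closed form (m >= 0)
--     q = m // 2
--     if m % 2 == 1:
--         return 1 + (10 ** (q + 1) - 10) // 9 * 2
--     return 1 + (10 ** q - 10) // 9 * 2 + 10 ** q
--
--
-- def handle_case(N):
--     if N < 10:
--         return N
--     s = str(N)
--     d = len(s)
--     # closed form for sum_{i=1}^{d-1} (10**(i//2) + 10**((i+1)//2) - 1)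
--     steps = powsum10(d - 1) + powsum10(d) - d
--     first_half_reversed = int(s[0:d // 2][::-1])
--     second_half = int(s[d // 2:])
--     if first_half_reversed == 1:
--         return steps + second_half
--     return first_half_reversed + second_half + steps
-- ===== Notes on version B (the rewrite author's own statement) =====
-- stated objective: simpler
-- what changed: The per-digit-count accumulation loop for steps_to_get_to_digits is replaced by a closed-form geometric-sum expression (powsum10) evaluated twice; the reconstruction from the digit halves is unchanged.
import Mathlib
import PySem

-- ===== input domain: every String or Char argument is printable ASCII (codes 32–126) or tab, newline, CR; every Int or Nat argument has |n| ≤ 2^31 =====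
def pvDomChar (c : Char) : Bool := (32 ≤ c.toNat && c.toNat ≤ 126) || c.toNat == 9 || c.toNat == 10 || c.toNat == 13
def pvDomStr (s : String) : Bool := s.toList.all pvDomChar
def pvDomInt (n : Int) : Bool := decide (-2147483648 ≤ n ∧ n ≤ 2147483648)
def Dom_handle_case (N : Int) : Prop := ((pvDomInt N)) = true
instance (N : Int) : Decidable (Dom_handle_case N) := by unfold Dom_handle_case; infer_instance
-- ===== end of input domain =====

-- B replaces A's accumulation loop for steps_to_get_to_digits by a closed-form geometric sum (objective: simpler).

-- ===== PORT A =====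
-- the loop 'for i in range(1, digits): steps += 10**floor(i/2) + 10**ceil(i/2) - 1';
-- for the i that occur (small ints) math.floor(i/2) = i//2 and math.ceil(i/2) = (i+1)//2 exactly;
-- both are ≥ 0 for i ≥ 1, so .toNat on the exponent is exact
def pvStepsA (digits : Int) : Int :=
  (PySem.List.pyRange 1 digits 1).foldl
    (fun acc i =>
      acc + 10 ^ (PySem.Int.floordiv i 2).toNat + 10 ^ (PySem.Int.floordiv (i + 1) 2).toNat - 1) 0

-- str(N) is ported as PySem.Int.toChars (the code-point list of PySem.Int.toStr);
-- int(...) is applied to a nonempty digit string here, so ofChars? never returns none and .getD 0 is unreachable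
def handle_case (N : Int) : Int :=
  if N < 10 then N
  else
    let digits : Int := (PySem.Int.toChars N).length
    let steps_to_get_to_digits := pvStepsA digits
    let digits_str := PySem.Int.toChars N
    -- ''.join(list(reversed(digits_str[0:len(digits_str)//2]))) = the reversed slice
    let first_half_reversed :=
      (PySem.Int.ofChars?
        ((PySem.List.slice digits_str (some 0)
          (some (PySem.Int.floordiv (digits_str.length : Int) 2))).reverse)).getD 0
    let second_half :=
      (PySem.Int.ofChars?
        (PySem.List.slice digits_str (some (PySem.Int.floordiv digits 2)) none)).getD 0
    if first_half_reversed = 1 then steps_to_get_to_digits + second_half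
    else first_half_reversed + second_half + steps_to_get_to_digits

-- ===== PORT B =====
-- Source B's powsum10: closed form for sum_{i=1}^{m} 10**(i//2); '//' is Python floor division
def pvPowsum10 (m : Int) : Int :=
  let q := PySem.Int.floordiv m 2
  if PySem.Int.mod m 2 = 1 then
    1 + PySem.Int.floordiv (10 ^ (q + 1).toNat - 10) 9 * 2
  else
    1 + PySem.Int.floordiv (10 ^ q.toNat - 10) 9 * 2 + 10 ^ q.toNat

-- s[...][::-1] is ported as .reverse (PySem.List.slice?_none_none_neg_one); int(...) as in port A
def handle_case_alt (N : Int) : Int :=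
  if N < 10 then N
  else
    let s := PySem.Int.toChars N
    let d : Int := s.length
    let steps := pvPowsum10 (d - 1) + pvPowsum10 d - d
    let first_half_reversed :=
      (PySem.Int.ofChars?
        ((PySem.List.slice s (some 0) (some (PySem.Int.floordiv d 2))).reverse)).getD 0
    let second_half :=
      (PySem.Int.ofChars? (PySem.List.slice s (some (PySem.Int.floordiv d 2)) none)).getD 0
    if first_half_reversed = 1 then steps + second_half
    else first_half_reversed + second_half + steps

-- ===== PRECONDITION & SPEC =====
def Spec_handle_case (N : Int) (out : Int) : Prop := out = handle_case_alt N
instance (N : Int) (out : Int) : Decidable (Spec_handle_case N out) := by unfold Spec_handle_case; infer_instance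

-- ===== CLAIM (what is proved, stated in full; the proofs are below) =====
def Claim_equal_handle_case : Prop := ∀ (N : Int), Dom_handle_case N → Spec_handle_case N (handle_case N)

-- ===== LEMMAS AND PROOFS =====

theorem pv_floordiv_natCast (n : Nat) : PySem.Int.floordiv (n : Int) 2 = ((n / 2 : Nat) : Int) := by
  rw [PySem.Int.floordiv, Int.fdiv_eq_ediv_of_nonneg _ (by norm_num : (0:Int) ≤ 2)]
  omega

theorem pv_mod_natCast (n : Nat) : PySem.Int.mod (n : Int) 2 = ((n % 2 : Nat) : Int) := by
  rw [PySem.Int.mod, Int.fmod_eq_emod_of_nonneg _ (by norm_num : (0:Int) ≤ 2)]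
  omega

theorem pv_dvd9 (t : Nat) : (9 : Int) ∣ 10 ^ t - 10 := by
  have h : (10 : Int) ^ t % 9 = 1 := by
    induction t with
    | zero => decide
    | succ t ih => rw [pow_succ, Int.mul_emod, ih]; decide
  omega

theorem pv_fd9 (k : Int) : PySem.Int.floordiv (9 * k) 9 = k := by
  simp [PySem.Int.floordiv, Int.mul_fdiv_cancel_left _ (by decide : (9:Int) ≠ 0)]

theorem pv_powsum_succ (m : Int) (hm : 0 ≤ m) :
    pvPowsum10 (m + 1) = pvPowsum10 m + 10 ^ (PySem.Int.floordiv (m + 1) 2).toNat := by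
  obtain ⟨n, rfl⟩ := Int.eq_ofNat_of_zero_le hm
  have hcast : ((n : Int) + 1) = ((n + 1 : Nat) : Int) := by push_cast; ring
  unfold pvPowsum10
  rw [hcast, pv_floordiv_natCast, pv_floordiv_natCast, pv_mod_natCast, pv_mod_natCast]
  rcases Nat.even_or_odd n with he | ho
  · obtain ⟨t, ht⟩ := he
    have ht2 : n = 2 * t := by omega
    subst ht2
    have e1 : (2 * t) % 2 = 0 := by omega
    have e2 : (2 * t + 1) % 2 = 1 := by omega
    have e3 : (2 * t) / 2 = t := by omega
    have e4 : (2 * t + 1) / 2 = t := by omega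
    rw [e1, e2, e3, e4]
    simp only [Nat.cast_one, Nat.cast_zero]
    rw [if_pos trivial, if_neg (by decide : ¬ ((0 : Int) = 1))]
    have e5 : (((t : Nat) : Int) + 1).toNat = t + 1 := by omega
    have e6 : (((t : Nat) : Int)).toNat = t := by omega
    rw [e5, e6]
    obtain ⟨k, hk⟩ := pv_dvd9 t
    have hk2 : (10 : Int) ^ (t + 1) - 10 = 9 * (10 * k + 10) := by rw [pow_succ]; linarith
    rw [hk, hk2, pv_fd9, pv_fd9]
    have hp : (10 : Int) ^ t = 9 * k + 10 := by linarith
    rw [hp]; ring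
  · obtain ⟨t, ht⟩ := ho
    subst ht
    have e1 : (2 * t + 1) % 2 = 1 := by omega
    have e2 : (2 * t + 1 + 1) % 2 = 0 := by omega
    have e3 : (2 * t + 1) / 2 = t := by omega
    have e4 : (2 * t + 1 + 1) / 2 = t + 1 := by omega
    rw [e1, e2, e3, e4]
    simp only [Nat.cast_one, Nat.cast_zero]
    rw [if_pos trivial, if_neg (by decide : ¬ ((0 : Int) = 1))]
    have e5 : (((t : Nat) : Int) + 1).toNat = t + 1 := by omega
    have e6 : (((t + 1 : Nat) : Int)).toNat = t + 1 := by omega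
    rw [e5, e6]

theorem pv_steps_eq (d : Int) (hd : 1 ≤ d) :
    pvStepsA d = pvPowsum10 (d - 1) + pvPowsum10 d - d := by
  induction d, hd using Int.le_induction with
  | base => decide
  | succ d hd ih =>
    have h1 : PySem.List.pyRange 1 (d + 1) 1 = PySem.List.pyRange 1 d 1 ++ [d] :=
      PySem.List.pyRange_one_succ_right hd
    have h2 := pv_powsum_succ d (by omega)
    have h3 := pv_powsum_succ (d - 1) (by omega)
    rw [sub_add_cancel] at h3
    unfold pvStepsA at ih ⊢
    rw [h1, List.foldl_append]
    simp only [List.foldl_cons, List.foldl_nil]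
    rw [ih]
    have hd1 : d + 1 - 1 = d := by ring
    rw [hd1, h2, h3]
    ring

theorem pv_toDigits_len_pos (n : Nat) : 1 ≤ (Nat.toDigits 10 n).length := by
  unfold Nat.toDigits
  simp only [Nat.toDigitsCore]
  split
  · simp
  · rw [Nat.toDigitsCore_lens_eq]
    omega

theorem pv_toChars_len_pos (N : Int) : 1 ≤ ((PySem.Int.toChars N).length : Int) := by
  unfold PySem.Int.toChars
  split
  · simp
  · have := pv_toDigits_len_pos N.toNat
    omega

theorem handle_case_spec : Claim_equal_handle_case := by
  intro N _
  unfold Spec_handle_case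
  by_cases hN : N < 10
  · simp [handle_case, handle_case_alt, hN]
  · simp only [handle_case, handle_case_alt, if_neg hN]
    rw [pv_steps_eq _ (pv_toChars_len_pos N)]
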